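-- pv_equiv track=rewrite | github.com/Fabio-A-Sa/Y1S1-ProgramingFundamentals | ME/ME 02 - Practice for PE02/5 - Number of patterns in a word.py | is_pattern
-- ===== SOURCE A (Python) =====
-- def is_pattern(astring):
--
--     net = 0
--     for i in range(len(astring)-1):
--         if astring[i+1] > astring[i]:
--             net += 1
--         if astring[i+1] < astring[i]:
--             net -= 1
--
--     return net == 0
-- ===== SOURCE B (Python) =====
-- def is_pattern(astring):
--     # Collapse consecutive duplicate characters into a run-free sequence.
--     runs = []
--     for ch in astring:
--         if not runs or runs[-1] != ch:
--             runs.append(ch)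
--     if not runs:
--         return True
--     # In `runs` every adjacent pair is a strict ascent or a strict descent,
--     # so ascents == descents  iff  ascents are exactly half of the len(runs)-1 pairs.
--     ups = 0
--     for a, b in zip(runs, runs[1:]):
--         if b > a:
--             ups += 1
--     return 2 * ups == len(runs) - 1
-- ===== Notes on version B (the rewrite author's own statement) =====
-- stated objective: alternative
-- what changed: B first collapses consecutive duplicate characters into a run-free sequence, then counts only ascents there and checks by arithmetic that they are exactly half of the remaining adjacent pairs (2*ups == len(runs)-1), instead of A's single signed running net over all adjacent pairs.
import Mathlib
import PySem

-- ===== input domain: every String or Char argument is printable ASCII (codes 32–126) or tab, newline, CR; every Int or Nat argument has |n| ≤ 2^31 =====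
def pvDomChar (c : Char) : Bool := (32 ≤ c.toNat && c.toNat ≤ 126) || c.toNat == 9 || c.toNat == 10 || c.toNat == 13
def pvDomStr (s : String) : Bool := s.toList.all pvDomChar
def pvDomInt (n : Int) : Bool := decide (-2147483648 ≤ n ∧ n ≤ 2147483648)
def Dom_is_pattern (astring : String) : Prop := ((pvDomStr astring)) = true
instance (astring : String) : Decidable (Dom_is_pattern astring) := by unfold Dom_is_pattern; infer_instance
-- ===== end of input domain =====

-- B collapses consecutive duplicate characters first, then counts only ascents in the
-- run-free sequence and checks 2*ups = len(runs)-1 by arithmetic (alternative algorithm).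


-- ===== PORT A =====
-- net = 0; for i in range(len(astring)-1): if s[i+1] > s[i]: net += 1; if s[i+1] < s[i]: net -= 1; return net == 0
-- (indices i and i+1 are always in range, so pyGetD's default is never read)
def is_pattern (astring : String) : Bool :=
  let cs := astring.toList
  let net : Int :=
    (PySem.List.pyRange 0 ((cs.length : Int) - 1) 1).foldl
      (fun net i =>
        let net := if PySem.List.pyGetD cs (i+1) 'a' > PySem.List.pyGetD cs i 'a' then net + 1 else net
        if PySem.List.pyGetD cs (i+1) 'a' < PySem.List.pyGetD cs i 'a' then net - 1 else net) 0
  net == 0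

-- ===== PORT B =====
-- runs = []; for ch: if not runs or runs[-1] != ch: runs.append(ch)
-- if not runs: return True
-- ups = 0; for a, b in zip(runs, runs[1:]): if b > a: ups += 1
-- return 2 * ups == len(runs) - 1
-- ('not runs or runs[-1] != ch' is 'runs = [] ∨ runs.getLast? ≠ some ch'; runs[-1] exists in that branch)
def is_pattern_alt (astring : String) : Bool :=
  let runs := astring.toList.foldl
    (fun runs ch => if runs = [] ∨ runs.getLast? ≠ some ch then runs ++ [ch] else runs) []
  if runs = [] then true
  else
    let ups := (runs.zip (PySem.List.slice runs (some 1) none)).foldl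
      (fun ups p => if p.2 > p.1 then ups + 1 else ups) (0 : Int)
    2 * ups == (runs.length : Int) - 1

-- ===== PRECONDITION & SPEC =====
def Spec_is_pattern (astring : String) (out : Bool) : Prop := out = is_pattern_alt astring
instance (astring : String) (out : Bool) : Decidable (Spec_is_pattern astring out) := by unfold Spec_is_pattern; infer_instance

-- ===== CLAIM (what is proved, stated in full; the proofs are below) =====
def Claim_equal_is_pattern : Prop := ∀ (astring : String), Dom_is_pattern astring → Spec_is_pattern astring (is_pattern astring)

-- ===== LEMMAS AND PROOFS =====

-- A's fold over the index range equals a fold over the adjacent-pair list.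
lemma fold_range_eq_fold_zip (cs : List Char) (f : Int → Char → Char → Int) (a : Int) :
    (PySem.List.pyRange 0 ((cs.length : Int) - 1) 1).foldl
      (fun net i => f net (PySem.List.pyGetD cs i 'a') (PySem.List.pyGetD cs (i+1) 'a')) a
    = (cs.zip cs.tail).foldl (fun net p => f net p.1 p.2) a := by
  cases cs with
  | nil => rw [PySem.List.pyRange_one_eq_nil (by simp)]; simp
  | cons c t =>
    have hb : ((c :: t).length : Int) - 1 = (((c :: t).zip t).length : Int) := by
      simp [List.length_zip]
    rw [List.tail_cons, hb]
    rw [PySem.List.foldl_congr_mem _ _ (fun net i =>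
        (fun net (p : Char × Char) => f net p.1 p.2) net
          (PySem.List.pyGetD ((c :: t).zip t) i ('a', 'a'))) a
      (by
        intro acc i hi
        rw [PySem.List.mem_pyRange_one] at hi
        obtain ⟨h0, h1⟩ := hi
        have hlen : i.toNat < ((c :: t).zip t).length := by omega
        have hlt : ((c :: t).zip t).length ≤ t.length := by simp [List.length_zip]
        simp only []
        rw [PySem.List.pyGetD_eq_getElem _ _ h0
              (by simp [List.length_zip] at h1 ⊢; omega),
            PySem.List.pyGetD_eq_getElem _ _ (by omega)
              (by simp [List.length_zip] at h1 ⊢; omega),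
            PySem.List.pyGetD_eq_getElem _ _ h0 (by exact_mod_cast h1)]
        have hit : (i + 1).toNat = i.toNat + 1 := by omega
        simp [List.getElem_zip, hit])]
    exact PySem.List.foldl_pyRange_zero_pyGetD' ((c :: t).zip t) ('a', 'a')
      (fun net p => f net p.1 p.2) a

-- the running net is the ascent count minus the descent count
lemma fold_eq_counts (l : List (Char × Char)) (a : Int) :
    l.foldl (fun net p =>
      let net := if p.2 > p.1 then net + 1 else net
      if p.2 < p.1 then net - 1 else net) a
    = a + (l.countP (fun p => decide (p.1 < p.2)) : Int)
        - (l.countP (fun p => decide (p.2 < p.1)) : Int) := by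
  induction l generalizing a with
  | nil => simp
  | cons p t ih =>
    simp only [List.foldl_cons, ih, List.countP_cons]
    simp only [decide_eq_true_eq]
    split_ifs <;> push_cast <;> omega

-- specification of B's run-collapsing loop: collapse with the last emitted char as context
def collapse : Option Char → List Char → List Char
  | _, [] => []
  | last, c :: cs => if some c = last then collapse last cs else c :: collapse (some c) cs

lemma foldl_step_eq_collapse (cs : List Char) (acc : List Char) :
    cs.foldl (fun runs ch => if runs = [] ∨ runs.getLast? ≠ some ch then runs ++ [ch] else runs) acc
      = acc ++ collapse acc.getLast? cs := by
  induction cs generalizing acc with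
  | nil => simp [collapse]
  | cons c t ih =>
    simp only [List.foldl_cons]
    by_cases h : acc = [] ∨ acc.getLast? ≠ some c
    · rw [if_pos h, ih]
      have hl : (acc ++ [c]).getLast? = some c := by simp
      rw [hl]
      have hne : ¬ some c = acc.getLast? := by
        rcases h with h | h
        · simp [h]
        · exact fun he => h he.symm
      simp [collapse, hne]
    · push Not at h
      rw [if_neg (by push Not; exact h), ih, h.2]
      simp [collapse]

-- count of adjacent pairs satisfying p, with an explicit previous character
def cntFrom (p : Char → Char → Bool) : Char → List Char → Nat
  | _, [] => 0
  | prev, c :: cs => (if p prev c then 1 else 0) + cntFrom p c cs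

lemma zip_countP_eq_cntFrom (p : Char → Char → Bool) (c : Char) (cs : List Char) :
    ((c :: cs).zip cs).countP (fun x => p x.1 x.2) = cntFrom p c cs := by
  induction cs generalizing c with
  | nil => simp [cntFrom]
  | cons d t ih =>
    simp [List.countP_cons, cntFrom, ih d]
    omega

-- collapsing does not change the count of pairs when p never holds on equal chars
lemma cntFrom_collapse (p : Char → Char → Bool) (hp : ∀ a, p a a = false)
    (cs : List Char) (prev : Char) :
    cntFrom p prev (collapse (some prev) cs) = cntFrom p prev cs := by
  induction cs generalizing prev with
  | nil => rfl
  | cons c t ih =>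
    by_cases h : c = prev
    · subst h
      simp [collapse, cntFrom, hp c, ih c]
    · simp [collapse, h, cntFrom, ih c]

-- in a collapsed sequence every adjacent pair is a strict ascent or descent
lemma asc_add_desc_eq_len (cs : List Char) (prev : Char) :
    cntFrom (fun a b => decide (a < b)) prev (collapse (some prev) cs)
      + cntFrom (fun a b => decide (b < a)) prev (collapse (some prev) cs)
      = (collapse (some prev) cs).length := by
  induction cs generalizing prev with
  | nil => rfl
  | cons c t ih =>
    by_cases h : c = prev
    · subst h
      rw [show collapse (some c) (c :: t) = collapse (some c) t from by simp [collapse]]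
      exact ih c
    · have hne : ¬ some c = some prev := by simpa using h
      simp only [collapse, if_neg hne, cntFrom, List.length_cons]
      have hi := ih c
      rcases lt_trichotomy prev c with hlt | heq | hgt
      · simp [hlt, asymm hlt]
        omega
      · exact absurd heq.symm h
      · simp [hgt, asymm hgt]
        omega

-- B's ups fold is a count
lemma foldl_ups_eq_countP (l : List (Char × Char)) (a : Int) :
    l.foldl (fun ups p => if p.2 > p.1 then ups + 1 else ups) a
      = a + (l.countP (fun p => decide (p.1 < p.2)) : Int) := by
  induction l generalizing a with
  | nil => simp
  | cons p t ih =>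
    simp only [List.foldl_cons, ih, List.countP_cons, gt_iff_lt, decide_eq_true_eq]
    split_ifs with h <;> push_cast <;> omega

-- ===== VERDICT (by name: the statement is the Claim_ definition above) =====
theorem is_pattern_spec : Claim_equal_is_pattern := by
  intro astring _
  unfold Spec_is_pattern is_pattern is_pattern_alt
  simp only [PySem.List.slice_from_one, foldl_step_eq_collapse, List.getLast?_nil, List.nil_append]
  rw [fold_range_eq_fold_zip astring.toList
      (fun net x y => if y < x then (if y > x then net + 1 else net) - 1 else
        if y > x then net + 1 else net)]
  rw [fold_eq_counts]
  cases hcs : astring.toList with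
  | nil => simp [collapse]
  | cons c t =>
    have hruns : collapse none (c :: t) = c :: collapse (some c) t := by
      simp [collapse]
    rw [hruns]
    simp only [List.tail_cons]
    rw [zip_countP_eq_cntFrom (fun a b => decide (a < b)),
        zip_countP_eq_cntFrom (fun a b => decide (b < a))]
    rw [if_neg (by simp), foldl_ups_eq_countP,
        zip_countP_eq_cntFrom (fun a b => decide (a < b))]
    have hA : cntFrom (fun a b => decide (a < b)) c t
        = cntFrom (fun a b => decide (a < b)) c (collapse (some c) t) :=
      (cntFrom_collapse _ (by simp) t c).symm
    have hD : cntFrom (fun a b => decide (b < a)) c t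
        = cntFrom (fun a b => decide (b < a)) c (collapse (some c) t) :=
      (cntFrom_collapse _ (by simp) t c).symm
    have hlen := asc_add_desc_eq_len t c
    rw [hA, hD, Bool.eq_iff_iff]
    simp only [beq_iff_eq, List.length_cons]
    push_cast
    omega
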